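-- pv_equiv track=rewrite | github.com/stiwari2004/numerology | backend/services/numerology_service.py | build_mahadasha_base_grid
-- ===== SOURCE A (Python) =====
-- from typing import Dict, Any, List, Optional
--
-- def build_mahadasha_base_grid(natal_grid: Dict[int, str], maha: int, personal_year: int,
--                               basic_numbers: List[int]) -> Dict[int, str]:
--     """
--     Build the fixed base grid for a Mahadasha-Antardasha cycle.
--     This base grid is computed ONCE per year and reused for all periods.
--
--     Base Grid = Natal + Mahadasha + Personal Year + Basic Numbers
--
--     Args:
--         natal_grid: The natal grid dictionary
--         maha: Mahadasha number
--         personal_year: Personal Year number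
--         basic_numbers: List of basic numbers [reduced_day, reduced_year]
--
--     Returns:
--         Base grid dictionary (fixed for the year)
--     """
--     # Start with natal grid (copy)
--     base_grid = {}
--     for num in range(1, 10):
--         natal_value = natal_grid.get(num)
--         base_grid[num] = natal_value if natal_value else ""
--
--     # Add Mahadasha number
--     if maha and 1 <= maha <= 9:
--         current_value = base_grid.get(maha) or ""
--         base_grid[maha] = current_value + str(maha)
--
--     # Add Personal Year number
--     if personal_year and 1 <= personal_year <= 9:
--         current_value = base_grid.get(personal_year) or ""
--         base_grid[personal_year] = current_value + str(personal_year)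
--
--     # Add Basic Numbers
--     for basic_num in basic_numbers:
--         if basic_num and 1 <= basic_num <= 9:
--             current_value = base_grid.get(basic_num) or ""
--             base_grid[basic_num] = current_value + str(basic_num)
--
--     return base_grid
-- ===== SOURCE B (Python) =====
-- def build_mahadasha_base_grid(natal_grid, maha, personal_year, basic_numbers):
--     # Tally the valid additions once, then build each slot in a single pass:
--     # every addition to slot v appends str(v), so order is irrelevant and
--     # str(num) * count reproduces the concatenation exactly.
--     counts = {}
--     for v in [maha, personal_year] + list(basic_numbers):
--         if v and 1 <= v <= 9:
--             counts[v] = counts.get(v, 0) + 1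
--     return {num: (natal_grid.get(num) or "") + str(num) * counts.get(num, 0)
--             for num in range(1, 10)}
-- ===== Notes on version B (the rewrite author's own statement) =====
-- stated objective: alternative
-- what changed: Instead of mutating the grid dict once per addition, B tallies the valid additions (maha, personal_year, basic numbers) into a counter and builds each slot in one comprehension as natal value plus str(num) repeated count times; correct because every addition to slot v appends exactly str(v), so order is irrelevant.
import Mathlib
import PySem

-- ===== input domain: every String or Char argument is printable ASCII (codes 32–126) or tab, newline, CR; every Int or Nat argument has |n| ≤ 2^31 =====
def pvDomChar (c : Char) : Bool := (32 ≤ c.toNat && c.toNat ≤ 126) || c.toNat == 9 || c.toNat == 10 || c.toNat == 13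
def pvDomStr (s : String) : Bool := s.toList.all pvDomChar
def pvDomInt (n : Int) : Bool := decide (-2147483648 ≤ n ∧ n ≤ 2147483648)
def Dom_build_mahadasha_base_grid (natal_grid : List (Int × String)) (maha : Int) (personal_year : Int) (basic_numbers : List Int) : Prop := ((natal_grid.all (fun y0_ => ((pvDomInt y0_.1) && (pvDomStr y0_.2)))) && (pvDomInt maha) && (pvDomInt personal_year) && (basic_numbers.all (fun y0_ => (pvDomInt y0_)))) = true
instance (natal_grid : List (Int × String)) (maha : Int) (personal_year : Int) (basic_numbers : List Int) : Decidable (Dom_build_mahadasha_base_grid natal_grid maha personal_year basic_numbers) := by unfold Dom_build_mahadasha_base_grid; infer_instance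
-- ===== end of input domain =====

-- B replaces A's per-addition dict mutation by a count-then-build pass: tally valid additions, then
-- emit each slot as natal value ++ str(num) repeated count times (alternative decomposition, same cost).


-- ===== PORT A =====
-- Python's `x or ""` / `x if x else ""` on an Optional[str]: truthy iff some non-empty string.
def pyOrEmpty (o : Option String) : String :=
  match o with
  | some v => if v == "" then "" else v
  | none => ""

def build_mahadasha_base_grid (natal_grid : List (Int × String)) (maha : Int) (personal_year : Int) (basic_numbers : List Int) : List (Int × String) :=
  let natalD := PySem.Dict.mk natal_grid
  -- base_grid = {}; for num in range(1,10): base_grid[num] = natal_value if natal_value else ""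
  let base0 := (PySem.List.pyRange 1 10 1).foldl
      (fun d num => d.insert num (pyOrEmpty (natalD.get? num))) PySem.Dict.empty
  -- if maha and 1 <= maha <= 9: base_grid[maha] = (base_grid.get(maha) or "") + str(maha)
  let base1 := if maha ≠ 0 ∧ 1 ≤ maha ∧ maha ≤ 9 then
      base0.insert maha (pyOrEmpty (base0.get? maha) ++ PySem.Int.toStr maha) else base0
  -- same guard and append for personal_year
  let base2 := if personal_year ≠ 0 ∧ 1 ≤ personal_year ∧ personal_year ≤ 9 then
      base1.insert personal_year (pyOrEmpty (base1.get? personal_year) ++ PySem.Int.toStr personal_year) else base1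
  -- for basic_num in basic_numbers: same guard and append
  let base3 := basic_numbers.foldl
      (fun d bn => if bn ≠ 0 ∧ 1 ≤ bn ∧ bn ≤ 9 then
          d.insert bn (pyOrEmpty (d.get? bn) ++ PySem.Int.toStr bn) else d) base2
  base3.items

-- ===== PORT B =====
-- Python's  s * n  for n : Int (non-positive gives "").
def strMul (s : String) (n : Int) : String :=
  strMulNat s n.toNat
where strMulNat (s : String) : Nat → String
  | 0 => ""
  | n + 1 => s ++ strMulNat s n

def build_mahadasha_base_grid_alt (natal_grid : List (Int × String)) (maha : Int) (personal_year : Int) (basic_numbers : List Int) : List (Int × String) :=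
  -- counts = {}; for v in [maha, personal_year] + list(basic_numbers): if valid: counts[v] = counts.get(v, 0) + 1
  let counts := ([maha, personal_year] ++ basic_numbers).foldl
      (fun c v => if v ≠ 0 ∧ 1 ≤ v ∧ v ≤ 9 then c.insert v (c.getD v 0 + 1) else c)
      PySem.Dict.empty
  -- {num: (natal_grid.get(num) or "") + str(num) * counts.get(num, 0) for num in range(1, 10)}
  (PySem.List.pyRange 1 10 1).map
    (fun num => (num, pyOrEmpty ((PySem.Dict.mk natal_grid).get? num) ++ strMul (PySem.Int.toStr num) (counts.getD num 0)))

-- ===== PRECONDITION & SPEC =====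
def Spec_build_mahadasha_base_grid (natal_grid : List (Int × String)) (maha : Int) (personal_year : Int) (basic_numbers : List Int) (out : List (Int × String)) : Prop := out = build_mahadasha_base_grid_alt natal_grid maha personal_year basic_numbers
instance (natal_grid : List (Int × String)) (maha : Int) (personal_year : Int) (basic_numbers : List Int) (out : List (Int × String)) : Decidable (Spec_build_mahadasha_base_grid natal_grid maha personal_year basic_numbers out) := by unfold Spec_build_mahadasha_base_grid; infer_instance

-- ===== CLAIM (what is proved, stated in full; the proofs are below) =====
def Claim_equal_build_mahadasha_base_grid : Prop := ∀ (natal_grid : List (Int × String)) (maha : Int) (personal_year : Int) (basic_numbers : List Int), Dom_build_mahadasha_base_grid natal_grid maha personal_year basic_numbers → Spec_build_mahadasha_base_grid natal_grid maha personal_year basic_numbers (build_mahadasha_base_grid natal_grid maha personal_year basic_numbers)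

-- ===== LEMMAS AND PROOFS =====

-- The nine-slot grid A maintains: keys 1..9 in order, values given by f.
def Gf (f : Int → String) : PySem.Dict Int String :=
  PySem.Dict.mk [(1, f 1), (2, f 2), (3, f 3), (4, f 4), (5, f 5), (6, f 6), (7, f 7), (8, f 8), (9, f 9)]

lemma pyOrEmpty_some (s : String) : pyOrEmpty (some s) = s := by
  by_cases h : s = "" <;> simp [pyOrEmpty, h]

-- A's in-range addition step on the nine-slot grid updates exactly slot v.
lemma insert_G (f : Int → String) (v : Int) (t : String) (h1 : 1 ≤ v) (h2 : v ≤ 9) :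
    (Gf f).insert v (pyOrEmpty ((Gf f).get? v) ++ t)
    = Gf (fun k => if k = v then f k ++ t else f k) := by
  interval_cases v <;> simp [Gf, PySem.Dict.insert, PySem.Dict.get?, pyOrEmpty_some]

-- Folding A's guarded addition step appends str(k) to slot k once per valid occurrence of k.
lemma fold_step (l : List Int) (f : Int → String) :
    l.foldl (fun d bn => if bn ≠ 0 ∧ 1 ≤ bn ∧ bn ≤ 9 then
        d.insert bn (pyOrEmpty (d.get? bn) ++ PySem.Int.toStr bn) else d) (Gf f)
    = Gf (fun k => f k ++ strMul.strMulNat (PySem.Int.toStr k)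
        ((l.filter (fun v => decide (v ≠ 0 ∧ 1 ≤ v ∧ v ≤ 9))).count k)) := by
  induction l generalizing f with
  | nil => simp [strMul.strMulNat]
  | cons v l ih =>
    by_cases hv : v ≠ 0 ∧ 1 ≤ v ∧ v ≤ 9
    · rw [List.foldl_cons, if_pos hv, insert_G f v _ hv.2.1 hv.2.2, ih]
      congr 1
      funext k
      by_cases hk : k = v
      · subst hk
        simp [hv, strMul.strMulNat, String.append_assoc]
      · simp [hv, hk, Ne.symm hk]
    · rw [List.foldl_cons, if_neg hv, ih]
      simp [hv]

-- B's tally loop counts the valid occurrences of k.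
lemma counts_getD (l : List Int) (d : PySem.Dict Int Int) (k : Int) :
    (l.foldl (fun c v => if v ≠ 0 ∧ 1 ≤ v ∧ v ≤ 9 then c.insert v (c.getD v 0 + 1) else c) d).getD k 0
    = d.getD k 0 + ((l.filter (fun v => decide (v ≠ 0 ∧ 1 ≤ v ∧ v ≤ 9))).count k : Int) := by
  induction l generalizing d with
  | nil => simp
  | cons v l ih =>
    by_cases hv : v ≠ 0 ∧ 1 ≤ v ∧ v ≤ 9
    · rw [List.foldl_cons, if_pos hv, ih]
      by_cases hk : k = v
      · subst hk
        simp [hv, List.count_cons]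
        ring
      · simp [PySem.Dict.getD_insert, hk, Ne.symm hk, hv]
    · rw [List.foldl_cons, if_neg hv, ih]
      simp [hv]

-- ===== VERDICT (by name: the statement is the Claim_ definition above) =====
set_option maxHeartbeats 1000000 in
theorem build_mahadasha_base_grid_spec : Claim_equal_build_mahadasha_base_grid := by
  intro natal maha py basics _
  unfold Spec_build_mahadasha_base_grid
  have hA : build_mahadasha_base_grid natal maha py basics
      = (([maha, py] ++ basics).foldl
          (fun d bn => if bn ≠ 0 ∧ 1 ≤ bn ∧ bn ≤ 9 then
              d.insert bn (pyOrEmpty (d.get? bn) ++ PySem.Int.toStr bn) else d)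
          (Gf (fun k => pyOrEmpty ((PySem.Dict.mk natal).get? k)))).items := rfl
  have hR : PySem.List.pyRange 1 10 1 = [1,2,3,4,5,6,7,8,9] := by decide
  have hB : build_mahadasha_base_grid_alt natal maha py basics
      = [1,2,3,4,5,6,7,8,9].map
          (fun num => (num, pyOrEmpty ((PySem.Dict.mk natal).get? num) ++
            strMul (PySem.Int.toStr num)
              ((([maha, py] ++ basics).foldl
                (fun c v => if v ≠ 0 ∧ 1 ≤ v ∧ v ≤ 9 then c.insert v (c.getD v 0 + 1) else c)
                PySem.Dict.empty).getD num 0))) := by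
    unfold build_mahadasha_base_grid_alt; rw [hR]
  have hc : ∀ k : Int, k ≠ 0 ∧ 1 ≤ k ∧ k ≤ 9 →
      strMul (PySem.Int.toStr k)
        ((([maha, py] ++ basics).foldl
          (fun c v => if v ≠ 0 ∧ 1 ≤ v ∧ v ≤ 9 then c.insert v (c.getD v 0 + 1) else c)
          PySem.Dict.empty).getD k 0)
      = strMul.strMulNat (PySem.Int.toStr k)
          ((([maha, py] ++ basics).filter (fun v => decide (v ≠ 0 ∧ 1 ≤ v ∧ v ≤ 9))).count k) := by
    intro k hk
    rw [counts_getD]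
    simp [strMul]
  rw [hA, fold_step, hB, List.map]
  show (Gf _).items = _
  simp only [Gf, List.map]
  rw [hc 1 (by norm_num), hc 2 (by norm_num), hc 3 (by norm_num), hc 4 (by norm_num),
    hc 5 (by norm_num), hc 6 (by norm_num), hc 7 (by norm_num), hc 8 (by norm_num), hc 9 (by norm_num)]
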